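-- pv_equiv track=rewrite | github.com/jclements3/trefoil | scripts/repair_hymnal.py | diatonic_span
-- ===== SOURCE A (Python) =====
-- NOTE_BASE = {"C": 0, "D": 2, "E": 4, "F": 5, "G": 7, "A": 9, "B": 11}
--
-- KEY_SIGS = {
--     "C": {}, "G": {"F": 1}, "D": {"F": 1, "C": 1}, "A": {"F": 1, "C": 1, "G": 1},
--     "E": {"F": 1, "C": 1, "G": 1, "D": 1},
--     "F": {"B": -1}, "Bb": {"B": -1, "E": -1}, "Eb": {"B": -1, "E": -1, "A": -1},
--     "Ab": {"B": -1, "E": -1, "A": -1, "D": -1},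
-- }
--
-- def diatonic_span(midis, scale=None, key=None):
--     """Count diatonic strings spanned (inclusive). Matches validate_hymnal.py."""
--     if len(midis) < 2:
--         return len(midis)
--     lo, hi = min(midis), max(midis)
--     if scale is not None:
--         return sum(1 for m in scale if lo <= m <= hi)
--     # Fallback: compute from key
--     ks = KEY_SIGS.get(key, {})
--     dpcs = set((NOTE_BASE[n] + ks.get(n, 0)) % 12 for n in NOTE_BASE)
--     return sum(1 for m in range(lo, hi + 1) if m % 12 in dpcs)
-- ===== SOURCE B (Python) =====
-- NOTE_BASE = {"C": 0, "D": 2, "E": 4, "F": 5, "G": 7, "A": 9, "B": 11}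
--
-- KEY_SIGS = {
--     "C": {}, "G": {"F": 1}, "D": {"F": 1, "C": 1}, "A": {"F": 1, "C": 1, "G": 1},
--     "E": {"F": 1, "C": 1, "G": 1, "D": 1},
--     "F": {"B": -1}, "Bb": {"B": -1, "E": -1}, "Eb": {"B": -1, "E": -1, "A": -1},
--     "Ab": {"B": -1, "E": -1, "A": -1, "D": -1},
-- }
--
-- def diatonic_span(midis, scale=None, key=None):
--     """Count diatonic pitches spanned (inclusive).  One explicit pass finds lo/hi;
--     the key fallback marks residues in a 12-slot table and counts each residue
--     class inside [lo, hi] by floor arithmetic instead of scanning the range."""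
--     if len(midis) < 2:
--         return len(midis)
--     lo = hi = midis[0]
--     for m in midis[1:]:
--         if m < lo:
--             lo = m
--         if m > hi:
--             hi = m
--     if scale is not None:
--         return len([m for m in scale if lo <= m <= hi])
--     ks = KEY_SIGS.get(key, {})
--     is_dia = [False] * 12
--     for n, base in NOTE_BASE.items():
--         is_dia[(base + ks.get(n, 0)) % 12] = True
--     total = 0
--     for r in range(12):
--         if is_dia[r]:
--             # integers m in [lo, hi] with m % 12 == r
--             total += (hi - r) // 12 - (lo - 1 - r) // 12
--     return total
-- ===== Notes on version B (the rewrite author's own statement) =====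
-- stated objective: alternative
-- what changed: B finds lo/hi in one explicit pass instead of min()+max(), counts the scale branch with a filtered-list length, and replaces the scan of range(lo, hi+1) by a 12-slot boolean residue table whose marked classes are counted in [lo, hi] by floor division, O(1) in the pitch span.
import Mathlib
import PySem

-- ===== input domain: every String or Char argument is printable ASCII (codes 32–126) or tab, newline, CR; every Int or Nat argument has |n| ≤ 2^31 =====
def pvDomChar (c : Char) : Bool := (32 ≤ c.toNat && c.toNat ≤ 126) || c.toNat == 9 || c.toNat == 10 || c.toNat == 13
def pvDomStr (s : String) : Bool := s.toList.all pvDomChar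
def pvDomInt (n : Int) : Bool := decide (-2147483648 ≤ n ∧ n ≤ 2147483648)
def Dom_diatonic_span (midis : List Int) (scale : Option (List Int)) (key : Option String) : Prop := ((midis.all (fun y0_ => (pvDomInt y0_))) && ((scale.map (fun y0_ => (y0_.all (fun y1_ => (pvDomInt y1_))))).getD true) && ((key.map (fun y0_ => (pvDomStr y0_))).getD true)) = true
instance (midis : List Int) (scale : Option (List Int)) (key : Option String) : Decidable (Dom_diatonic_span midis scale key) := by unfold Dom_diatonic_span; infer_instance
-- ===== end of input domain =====

-- B finds lo/hi in one explicit pass, marks diatonic residues in a 12-slot boolean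
-- table, and counts each residue class in [lo, hi] by floor division instead of
-- scanning range(lo, hi+1); objective: alternative algorithm (no scan of the span).


-- module-level constants shared by A and B (same module in Python)
def noteBase : PySem.Dict String Int :=
  PySem.Dict.ofList [("C", 0), ("D", 2), ("E", 4), ("F", 5), ("G", 7), ("A", 9), ("B", 11)]

def keySigs : PySem.Dict String (PySem.Dict String Int) :=
  PySem.Dict.ofList
    [ ("C", PySem.Dict.ofList []),
      ("G", PySem.Dict.ofList [("F", 1)]),
      ("D", PySem.Dict.ofList [("F", 1), ("C", 1)]),
      ("A", PySem.Dict.ofList [("F", 1), ("C", 1), ("G", 1)]),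
      ("E", PySem.Dict.ofList [("F", 1), ("C", 1), ("G", 1), ("D", 1)]),
      ("F", PySem.Dict.ofList [("B", -1)]),
      ("Bb", PySem.Dict.ofList [("B", -1), ("E", -1)]),
      ("Eb", PySem.Dict.ofList [("B", -1), ("E", -1), ("A", -1)]),
      ("Ab", PySem.Dict.ofList [("B", -1), ("E", -1), ("A", -1), ("D", -1)]) ]

-- KEY_SIGS.get(key, {}): Python's key may be None, which is never a dict key
def ksOf (key : Option String) : PySem.Dict String Int :=
  match key with
  | some k => keySigs.getD k (PySem.Dict.ofList [])
  | none => PySem.Dict.ofList []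

-- A: set((NOTE_BASE[n] + ks.get(n, 0)) % 12 for n in NOTE_BASE); NOTE_BASE[n] is ported
-- with getD 0, exact here because n ranges over NOTE_BASE's own keys
def dpcsOf (ks : PySem.Dict String Int) : PySem.Set Int :=
  PySem.Set.ofList (noteBase.keys.map (fun n => PySem.Int.mod (noteBase.getD n 0 + ks.getD n 0) 12))

-- ===== PORT A =====
def diatonic_span (midis : List Int) (scale : Option (List Int)) (key : Option String) : Int :=
  if midis.length < 2 then (midis.length : Int)
  else
    -- len(midis) ≥ 2, so min/max exist; the none arms are unreachable
    match PySem.List.min? midis (fun x => x) with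
    | none => 0
    | some lo =>
    match PySem.List.max? midis (fun x => x) with
    | none => 0
    | some hi =>
      match scale with
      | some s => s.foldl (fun acc m => if lo ≤ m ∧ m ≤ hi then acc + 1 else acc) 0
      | none =>
        let dpcs := dpcsOf (ksOf key)
        (PySem.List.pyRange lo (hi + 1)).foldl
          (fun acc m => if dpcs.contains (PySem.Int.mod m 12) then acc + 1 else acc) 0

-- ===== PORT B =====
-- is_dia = [False]*12; for n, base in NOTE_BASE.items(): is_dia[(base + ks.get(n,0)) % 12] = True
-- (index is always in 0..11, so list.set is exact for the Python index assignment)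
def diaTable (ks : PySem.Dict String Int) : List Bool :=
  noteBase.items.foldl
    (fun t p => t.set (PySem.Int.mod (p.2 + ks.getD p.1 0) 12).toNat true)
    (List.replicate 12 false)

def diatonic_span_alt (midis : List Int) (scale : Option (List Int)) (key : Option String) : Int :=
  if midis.length < 2 then (midis.length : Int)
  else
    match midis with
    | [] => 0  -- unreachable: length ≥ 2
    | m0 :: rest =>
      -- lo = hi = midis[0]; one explicit pass over midis[1:]
      let p := rest.foldl
        (fun p m => (if m < p.1 then m else p.1, if m > p.2 then m else p.2)) (m0, m0)
      let lo := p.1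
      let hi := p.2
      match scale with
      | some s => ((s.filter (fun m => decide (lo ≤ m ∧ m ≤ hi))).length : Int)
      | none =>
        let isDia := diaTable (ksOf key)
        -- for r in range(12): if is_dia[r]: total += (hi-r)//12 - (lo-1-r)//12
        (PySem.List.pyRange 0 12).foldl
          (fun total r =>
            if isDia.getD r.toNat false then
              total + (PySem.Int.floordiv (hi - r) 12 - PySem.Int.floordiv (lo - 1 - r) 12)
            else total) 0

-- ===== PRECONDITION & SPEC =====
def Spec_diatonic_span (midis : List Int) (scale : Option (List Int)) (key : Option String) (out : Int) : Prop := out = diatonic_span_alt midis scale key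
instance (midis : List Int) (scale : Option (List Int)) (key : Option String) (out : Int) : Decidable (Spec_diatonic_span midis scale key out) := by unfold Spec_diatonic_span; infer_instance

-- ===== CLAIM (what is proved, stated in full; the proofs are below) =====
def Claim_equal_diatonic_span : Prop := ∀ (midis : List Int) (scale : Option (List Int)) (key : Option String), Dom_diatonic_span midis scale key → Spec_diatonic_span midis scale key (diatonic_span midis scale key)

-- ===== LEMMAS AND PROOFS =====

-- the running min is ≤ its seed
lemma foldl_min_le (t : List Int) : ∀ (a : Int), t.foldl min a ≤ a := by
  induction t with
  | nil => intro a; simp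
  | cons x t ih =>
    intro a
    calc (x :: t).foldl min a = t.foldl min (min a x) := rfl
    _ ≤ min a x := ih (min a x)
    _ ≤ a := min_le_left a x

-- B's one-pass pair fold is (running min, running max)
lemma foldl_pair_min_max (t : List Int) : ∀ (a b : Int),
    t.foldl (fun p m => (if m < p.1 then m else p.1, if m > p.2 then m else p.2)) (a, b)
      = (t.foldl min a, t.foldl max b) := by
  induction t with
  | nil => intro a b; rfl
  | cons x t ih =>
    intro a b
    have h1 : (if x < a then x else a) = min a x := by rw [min_def]; split_ifs <;> omega
    have h2 : (if x > b then x else b) = max b x := by rw [max_def]; split_ifs <;> omega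
    simp only [List.foldl_cons, ih, h1, h2]

-- closed form for the count of m in range(lo, lo + n) with m % 12 == r
lemma count_res (lo r : Int) (h0 : 0 ≤ r) (h1 : r < 12) : ∀ n : Nat,
    (((PySem.List.pyRange lo (lo + n)).countP (fun m => PySem.Int.mod m 12 == r) : Int))
      = (lo + n - 1 - r) / 12 - (lo - 1 - r) / 12 := by
  intro n
  induction n with
  | zero =>
    rw [PySem.List.pyRange_one_eq_nil (by simp)]
    simp
  | succ n ih =>
    have hm : PySem.Int.mod (lo + n) 12 = (lo + n) % 12 :=
      PySem.Int.mod_eq_emod_of_pos (by norm_num)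
    push_cast
    rw [show lo + ((n : Int) + 1) = (lo + (n : Int)) + 1 by ring,
        PySem.List.pyRange_one_succ_right (by omega), List.countP_append]
    push_cast
    rw [ih]
    simp only [List.countP_cons, List.countP_nil, hm, beq_iff_eq]
    split_ifs with h <;> push_cast <;> omega

-- disjoint residues: counting membership in r :: rs splits into the two counts
lemma countP_split (L : List Int) (r : Int) (rs : List Int) (h : r ∉ rs) :
    L.countP (fun m => decide (PySem.Int.mod m 12 ∈ r :: rs))
      = L.countP (fun m => PySem.Int.mod m 12 == r)
        + L.countP (fun m => decide (PySem.Int.mod m 12 ∈ rs)) := by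
  induction L with
  | nil => simp
  | cons a t ih =>
    simp only [List.countP_cons, ih]
    have hsplit : (if (decide (PySem.Int.mod a 12 ∈ r :: rs)) = true then 1 else 0)
        = (if (PySem.Int.mod a 12 == r) = true then (1:Nat) else 0)
          + (if (decide (PySem.Int.mod a 12 ∈ rs)) = true then 1 else 0) := by
      have hm : PySem.Int.mod a 12 = a % 12 := PySem.Int.mod_eq_emod_of_pos (by norm_num)
      rw [hm]
      by_cases h1 : a % 12 = r
      · have h2 : a % 12 ∉ rs := h1 ▸ h
        simp [h1, h]
      · by_cases h3 : a % 12 ∈ rs <;> simp [h1, h3]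
    omega

-- the count over range(lo, hi+1) of residues in a nodup list S equals the sum of
-- per-residue closed forms over S
lemma count_sum (lo hi : Int) (hle : lo ≤ hi + 1) : ∀ (S : List Int),
    (∀ r ∈ S, 0 ≤ r ∧ r < 12) → S.Nodup →
    (((PySem.List.pyRange lo (hi + 1)).countP (fun m => decide (PySem.Int.mod m 12 ∈ S)) : Int))
      = (S.map (fun r => (hi - r) / 12 - (lo - 1 - r) / 12)).sum := by
  intro S
  induction S with
  | nil => intro _ _; simp
  | cons r rs ih =>
    intro hb hnd
    rw [List.nodup_cons] at hnd
    rw [countP_split _ r rs hnd.1]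
    have hres : (((PySem.List.pyRange lo (hi + 1)).countP
        (fun m => PySem.Int.mod m 12 == r)) : Int) = (hi - r) / 12 - (lo - 1 - r) / 12 := by
      have h1 := count_res lo r (hb r (by simp)).1 (hb r (by simp)).2 (hi + 1 - lo).toNat
      rw [show lo + ((hi + 1 - lo).toNat : Int) = hi + 1 by omega] at h1
      omega
    push_cast
    rw [hres, List.map_cons, List.sum_cons,
      ih (fun x hx => hb x (by simp [hx])) hnd.2]

-- the residue list B marks (over items) is the residue list A uses (over keys)
def residues (ks : PySem.Dict String Int) : List Int :=
  noteBase.keys.map (fun n => PySem.Int.mod (noteBase.getD n 0 + ks.getD n 0) 12)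

lemma residues_bounds (ks : PySem.Dict String Int) : ∀ r ∈ residues ks, 0 ≤ r ∧ r < 12 := by
  intro r hr
  rw [residues, List.mem_map] at hr
  obtain ⟨n, _, rfl⟩ := hr
  exact ⟨PySem.Int.mod_nonneg _ (by norm_num), PySem.Int.mod_lt _ (by norm_num)⟩

-- the marking fold sets exactly the residue indices to true
lemma table_getD (rs : List Int) (hb : ∀ r ∈ rs, 0 ≤ r ∧ r < 12) :
    ∀ (t : List Bool), t.length = 12 → ∀ (i : Nat), i < 12 →
    (rs.foldl (fun t r => t.set r.toNat true) t).getD i false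
      = (decide ((i : Int) ∈ rs) || t.getD i false) := by
  induction rs with
  | nil => intro t ht i hi; simp
  | cons r rs ih =>
    intro t ht i hi
    have hr := hb r (by simp)
    have hlen : (t.set r.toNat true).length = 12 := by simp [ht]
    rw [List.foldl_cons, ih (fun x hx => hb x (by simp [hx])) _ hlen i hi]
    simp only [List.getD_eq_getElem?_getD, List.getElem?_set, ht]
    by_cases hir : (i : Int) = r
    · have : r.toNat = i := by omega
      simp [this, hi, hir]
    · have : ¬ r.toNat = i := by omega
      simp [this, hir]

-- B's fold over items marks exactly the A-side residues
lemma diaTable_getD (ks : PySem.Dict String Int) (i : Nat) (hi : i < 12) :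
    (diaTable ks).getD i false = decide ((i : Int) ∈ residues ks) := by
  have hkeys : (noteBase : PySem.Dict String Int).keys.Nodup := by
    rw [noteBase]; decide
  have hitems := PySem.Dict.items_eq_map_keys noteBase hkeys (0 : Int)
  rw [diaTable, hitems, List.foldl_map]
  have := table_getD (residues ks) (residues_bounds ks)
    (List.replicate 12 false) (by simp) i hi
  rw [residues] at this ⊢
  rw [List.foldl_map] at this
  have hrep : (List.replicate 12 false).getD i false = false := by
    rw [List.getD_eq_getElem?_getD, List.getElem?_replicate]
    split_ifs <;> rfl
  rw [this, hrep, Bool.or_false]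

-- a guarded accumulating fold is the sum of f over the filtered list
lemma foldl_if_add_sum (q : Int → Bool) (f : Int → Int) : ∀ (L : List Int) (init : Int),
    L.foldl (fun total r => if q r then total + f r else total) init
      = init + ((L.filter q).map f).sum := by
  intro L
  induction L with
  | nil => intro init; simp
  | cons x t ih =>
    intro init
    by_cases hx : q x <;> simp [List.foldl_cons, hx, ih] <;> ring

-- the two fallback branches agree
lemma branch_eq (lo hi : Int) (hle : lo ≤ hi) (ks : PySem.Dict String Int) :
    (PySem.List.pyRange lo (hi + 1)).foldl
        (fun acc m => if (dpcsOf ks).contains (PySem.Int.mod m 12) then acc + 1 else acc) 0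
      = (PySem.List.pyRange 0 12).foldl
          (fun total r =>
            if (diaTable ks).getD r.toNat false then
              total + (PySem.Int.floordiv (hi - r) 12 - PySem.Int.floordiv (lo - 1 - r) 12)
            else total) 0 := by
  -- the filtered residue list both sides count over
  set S : List Int := (PySem.List.pyRange 0 12).filter (fun r => decide (r ∈ residues ks)) with hS
  have hSb : ∀ r ∈ S, 0 ≤ r ∧ r < 12 := by
    intro r hr
    rw [hS, List.mem_filter, PySem.List.mem_pyRange_one] at hr
    exact ⟨hr.1.1, by omega⟩
  have hSnd : S.Nodup := List.Nodup.filter _ (PySem.List.nodup_pyRange_one 0 12)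
  have hSmem : ∀ x : Int, x ∈ S ↔ x ∈ residues ks := by
    intro x
    rw [hS, List.mem_filter, PySem.List.mem_pyRange_one]
    constructor
    · intro h; exact of_decide_eq_true h.2
    · intro h
      have := residues_bounds ks x h
      exact ⟨⟨this.1, by omega⟩, by simpa⟩
  -- A side: the fold is a countP, over membership in S
  have hcnt : ∀ x : Int, (dpcsOf ks).contains x = decide (x ∈ S) := by
    intro x
    have hiff : x ∈ S ↔ x ∈ dpcsOf ks := by
      rw [hSmem, dpcsOf, PySem.Set.mem_ofList, residues]
    by_cases hx : x ∈ dpcsOf ks <;>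
      simp [hx, PySem.Set.contains_eq_listContains, hiff]
  -- B side: the guarded fold is the sum over S
  have hq : ∀ r ∈ PySem.List.pyRange (0:Int) 12,
      (diaTable ks).getD r.toNat false = decide (r ∈ residues ks) := by
    intro r hr
    rw [PySem.List.mem_pyRange_one] at hr
    have h12 : r.toNat < 12 := by omega
    rw [diaTable_getD ks r.toNat h12, show ((r.toNat : Int)) = r by omega]
  have hB : (PySem.List.pyRange 0 12).foldl
      (fun total r =>
        if (diaTable ks).getD r.toNat false then
          total + (PySem.Int.floordiv (hi - r) 12 - PySem.Int.floordiv (lo - 1 - r) 12)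
        else total) 0
      = (S.map (fun r => (hi - r) / 12 - (lo - 1 - r) / 12)).sum := by
    rw [PySem.List.foldl_congr_mem _ _
        (fun total r =>
          if decide (r ∈ residues ks) then
            total + (PySem.Int.floordiv (hi - r) 12 - PySem.Int.floordiv (lo - 1 - r) 12)
          else total) 0
        (fun total r hr => by rw [hq r hr]),
      foldl_if_add_sum (fun r => decide (r ∈ residues ks))
        (fun r => PySem.Int.floordiv (hi - r) 12 - PySem.Int.floordiv (lo - 1 - r) 12)
        (PySem.List.pyRange 0 12) 0, zero_add, ← hS]
    simp only [PySem.Int.floordiv_eq_ediv_of_pos (show (0:Int) < 12 by norm_num)]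
  rw [hB]
  simp only [hcnt, PySem.List.foldl_count_if, zero_add]
  exact count_sum lo hi (by omega) S hSb hSnd

-- ===== VERDICT (by name: the statement is the Claim_ definition above) =====
theorem diatonic_span_spec : Claim_equal_diatonic_span := by
  intro midis scale key _
  unfold Spec_diatonic_span diatonic_span diatonic_span_alt
  by_cases h2 : midis.length < 2
  · simp [h2]
  · simp only [h2, if_false]
    cases midis with
    | nil => exact absurd (by simp) h2
    | cons m0 rest =>
      simp only [PySem.List.min?_id_cons, PySem.List.max?_id_cons, foldl_pair_min_max]
      set lo := rest.foldl min m0 with hlo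
      set hi := rest.foldl max m0 with hhi
      have hle : lo ≤ hi := by
        have h1 : lo ≤ m0 := foldl_min_le rest m0
        have h2' : m0 ≤ hi := (PySem.List.le_foldl_max rest m0).1
        omega
      cases scale with
      | some s =>
        simp only []
        rw [show (fun acc m => if lo ≤ m ∧ m ≤ hi then acc + 1 else acc)
              = (fun (acc : Int) (m : Int) => if decide (lo ≤ m ∧ m ≤ hi) = true then acc + 1 else acc)
            from by funext acc m; simp,
          PySem.List.foldl_count_if (fun m => decide (lo ≤ m ∧ m ≤ hi)) s 0,
          List.countP_eq_length_filter]
        simp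
      | none =>
        simp only []
        exact branch_eq lo hi hle (ksOf key)
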